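-- pv_equiv track=rewrite | github.com/jodygarnett/translate | tests/test_directive.py | indentation
-- ===== SOURCE A (Python) =====
-- def indentation(text:str) -> list[int]:
--     """
--     Check indentation of provided text, tabs treated as three spaces, blank line marked as -1.
--     """
--     list = []
--     for line in text.split('\n'):
--         blank = len(line.strip()) == 0
--         if not blank:
--             # treat tabs as three spaces
--             line = line.replace('\t','   ')
--             list.append(len(line)-len(line.lstrip()))
--         else:
--             list.append(-1)
--
--     return list
-- ===== SOURCE B (Python) =====
-- def indentation(text: str) -> list[int]:
--     result = []
--     for line in text.split('\n'):
--         indent = -1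
--         width = 0
--         for c in line:
--             if c.isspace():
--                 width += 3 if c == '\t' else 1
--             else:
--                 indent = width
--                 break
--         result.append(indent)
--     return result
-- ===== Notes on version B (the rewrite author's own statement) =====
-- stated objective: alternative
-- what changed: Replaces A's strip/replace/lstrip string passes per line with a single left-to-right scan of the leading whitespace that accumulates a weighted count (tab=3, other whitespace=1) and stops at the first non-whitespace character.
import Mathlib
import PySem

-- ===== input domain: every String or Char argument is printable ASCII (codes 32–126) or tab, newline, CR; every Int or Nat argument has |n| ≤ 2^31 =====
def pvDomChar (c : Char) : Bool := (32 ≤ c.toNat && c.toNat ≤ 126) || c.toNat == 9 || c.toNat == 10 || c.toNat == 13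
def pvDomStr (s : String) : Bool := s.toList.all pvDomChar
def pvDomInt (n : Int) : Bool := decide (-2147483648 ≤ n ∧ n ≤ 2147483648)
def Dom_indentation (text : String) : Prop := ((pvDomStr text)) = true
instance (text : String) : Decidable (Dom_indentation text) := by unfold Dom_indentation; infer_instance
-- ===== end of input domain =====

-- B replaces A's per-line strip/replace/lstrip passes with one weighted scan of the
-- leading whitespace (tab = 3, other whitespace = 1): a different, single-pass decomposition.


-- ===== PORT A =====
def indentation (text : String) : List Int :=
  (PySem.Chars.splitOn text.toList ['\n']).foldl (fun l line =>
    let blank : Bool := (PySem.Chars.strip line).length == 0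
    if !blank then
      let line2 := PySem.Chars.replace line ['\t'] [' ', ' ', ' ']
      l ++ [(line2.length : Int) - ((PySem.Chars.lstrip line2).length : Int)]
    else
      l ++ [(-1 : Int)]) []

-- ===== PORT B =====
-- one pass per line: weighted leading-whitespace scan, -1 when no non-whitespace is found
def scanIndent : List Char → Int → Option Int
  | [], _ => none
  | c :: rest, width =>
      if PySem.Chars.isspace c then
        scanIndent rest (width + (if c = '\t' then 3 else 1))
      else
        some width

def indentation_alt (text : String) : List Int :=
  (PySem.Chars.splitOn text.toList ['\n']).map (fun line => (scanIndent line 0).getD (-1))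

-- ===== PRECONDITION & SPEC =====
def Spec_indentation (text : String) (out : List Int) : Prop := out = indentation_alt text
instance (text : String) (out : List Int) : Decidable (Spec_indentation text out) := by unfold Spec_indentation; infer_instance

-- ===== CLAIM (what is proved, stated in full; the proofs are below) =====
def Claim_equal_indentation : Prop := ∀ (text : String), Dom_indentation text → Spec_indentation text (indentation text)

-- ===== LEMMAS AND PROOFS =====

-- abbreviations used only in the proofs
def tabExp (c : Char) : List Char := if c = '\t' then [' ', ' ', ' '] else [c]

def weight (c : Char) : Int := if c = '\t' then 3 else 1

-- replace with the single-character pattern '\t' is character-wise substitution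
lemma replace_go_tab (new : List Char) (fuel : Nat) (l acc : List Char) (h : l.length ≤ fuel) :
    PySem.Chars.replace.go ['\t'] new fuel l acc =
      acc.reverse ++ l.flatMap (fun c => if c = '\t' then new else [c]) := by
  induction fuel generalizing l acc with
  | zero =>
    cases l with
    | nil => simp [PySem.Chars.replace.go]
    | cons c t => simp at h
  | succ fuel ih =>
    cases l with
    | nil => simp [PySem.Chars.replace.go]
    | cons c t =>
      simp only [List.length_cons, Nat.succ_le_succ_iff] at h
      by_cases hc : c = '\t'
      · subst hc
        have hpre : List.isPrefixOf ['\t'] ('\t' :: t) = true := by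
          simp [List.isPrefixOf]
        simp only [PySem.Chars.replace.go, hpre, if_pos]
        rw [ih _ _ (by simpa using h)]
        simp
      · have hpre : List.isPrefixOf ['\t'] (c :: t) = false := by
          simp [List.isPrefixOf]
          exact fun h => hc h.symm
        simp only [PySem.Chars.replace.go, hpre]
        rw [if_neg (by simp), ih _ _ h]
        simp [hc]

lemma replace_tab (cs : List Char) :
    PySem.Chars.replace cs ['\t'] [' ', ' ', ' '] = cs.flatMap tabExp := by
  unfold PySem.Chars.replace
  rw [if_neg (by simp)]
  rw [replace_go_tab [' ', ' ', ' '] cs.length cs [] le_rfl]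
  rfl

lemma all_dropWhile (p : Char → Bool) (cs : List Char) :
    (∀ c ∈ cs.dropWhile p, p c = true) ↔ ∀ c ∈ cs, p c = true := by
  induction cs with
  | nil => simp
  | cons c t ih =>
    by_cases hc : p c = true
    · simp [List.dropWhile_cons_of_pos hc, ih, hc]
    · rw [List.dropWhile_cons_of_neg hc]

lemma strip_len_zero_iff (cs : List Char) :
    (PySem.Chars.strip cs).length = 0 ↔ ∀ c ∈ cs, PySem.Chars.isspace c = true := by
  unfold PySem.Chars.strip PySem.Chars.rstrip PySem.Chars.lstrip
  rw [List.length_eq_zero_iff, List.reverse_eq_nil_iff, List.dropWhile_eq_nil_iff]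
  simp only [List.mem_reverse]
  exact all_dropWhile _ cs

lemma scanIndent_none_iff (cs : List Char) (a : Int) :
    scanIndent cs a = none ↔ ∀ c ∈ cs, PySem.Chars.isspace c = true := by
  induction cs generalizing a with
  | nil => simp [scanIndent]
  | cons c t ih =>
    by_cases hc : PySem.Chars.isspace c = true
    · simp [scanIndent, hc, ih]
    · simp [scanIndent, hc]

lemma scanIndent_some (cs : List Char) (a : Int) (h : ¬ ∀ c ∈ cs, PySem.Chars.isspace c = true) :
    scanIndent cs a = some (a + ((cs.takeWhile PySem.Chars.isspace).map weight).sum) := by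
  induction cs generalizing a with
  | nil => exact absurd (by simp) h
  | cons c t ih =>
    by_cases hc : PySem.Chars.isspace c = true
    · have ht : ¬ ∀ x ∈ t, PySem.Chars.isspace x = true := by
        intro hall
        exact h (by intro x hx; rcases List.mem_cons.mp hx with rfl | hx; exact hc; exact hall x hx)
      simp only [scanIndent, hc, if_pos]
      rw [ih _ ht]
      simp only [List.takeWhile_cons, hc, if_pos, List.map_cons, List.sum_cons]
      unfold weight
      by_cases htab : c = '\t' <;> simp [htab] <;> ring
    · simp [scanIndent, hc]

-- lstrip of the tab-expanded line is the tab-expansion of the line after its leading whitespace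
lemma lstrip_flat (cs : List Char) :
    PySem.Chars.lstrip (cs.flatMap tabExp) = (cs.dropWhile PySem.Chars.isspace).flatMap tabExp := by
  induction cs with
  | nil => simp [PySem.Chars.lstrip]
  | cons c t ih =>
    by_cases hc : PySem.Chars.isspace c = true
    · rw [List.flatMap_cons, List.dropWhile_cons_of_pos hc, ← ih]
      unfold PySem.Chars.lstrip tabExp
      by_cases htab : c = '\t'
      · subst htab
        simp [show PySem.Chars.isspace ' ' = true by decide]
      · simp [htab, hc]
    · rw [List.flatMap_cons, List.dropWhile_cons_of_neg hc, List.flatMap_cons]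
      have : tabExp c = [c] := by
        unfold tabExp
        rw [if_neg (by intro h; subst h; exact hc (by decide))]
      rw [this]
      unfold PySem.Chars.lstrip
      simp [hc]

lemma flat_len (cs : List Char) :
    ((cs.flatMap tabExp).length : Int) = (cs.map weight).sum := by
  induction cs with
  | nil => simp
  | cons c t ih =>
    rw [List.flatMap_cons, List.map_cons, List.sum_cons, List.length_append, ← ih]
    unfold tabExp weight
    by_cases htab : c = '\t' <;> simp [htab]

-- per-line agreement between A's computation and B's scan
lemma line_eq (cs : List Char) :
    (if !((PySem.Chars.strip cs).length == 0) then
        ((PySem.Chars.replace cs ['\t'] [' ', ' ', ' ']).length : Int) -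
          ((PySem.Chars.lstrip (PySem.Chars.replace cs ['\t'] [' ', ' ', ' '])).length : Int)
      else -1) = (scanIndent cs 0).getD (-1) := by
  by_cases hall : ∀ c ∈ cs, PySem.Chars.isspace c = true
  · rw [(scanIndent_none_iff cs 0).mpr hall, if_neg]
    · rfl
    · simp [(strip_len_zero_iff cs).mpr hall]
  · rw [scanIndent_some cs 0 hall, replace_tab, lstrip_flat, flat_len, flat_len, if_pos]
    · have hsplit : cs.map weight = (cs.takeWhile PySem.Chars.isspace).map weight ++
          (cs.dropWhile PySem.Chars.isspace).map weight := by
        rw [← List.map_append, List.takeWhile_append_dropWhile]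
      rw [hsplit, List.sum_append]
      simp
    · simp
      intro h0
      exact hall ((strip_len_zero_iff cs).mp (by rw [h0]; rfl))

lemma foldl_funext {α β : Type} (f g : β → α → β) (xs : List α) (a : β)
    (h : ∀ b x, f b x = g b x) : xs.foldl f a = xs.foldl g a := by
  induction xs generalizing a with
  | nil => rfl
  | cons x t ih => rw [List.foldl_cons, List.foldl_cons, h, ih]

lemma foldl_append_map (f : List Char → Int) (xs : List (List Char)) (acc : List Int) :
    xs.foldl (fun l line => l ++ [f line]) acc = acc ++ xs.map f := by
  induction xs generalizing acc with
  | nil => simp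
  | cons x t ih => simp [ih]

-- ===== VERDICT (by name: the statement is the Claim_ definition above) =====
theorem indentation_spec : Claim_equal_indentation := by
  intro text _
  unfold Spec_indentation indentation indentation_alt
  rw [foldl_funext _ (fun l line => l ++ [(scanIndent line 0).getD (-1)]) _ []
      (by
        intro l line
        simp only
        rw [← line_eq line]
        by_cases hb : ((PySem.Chars.strip line).length == 0) = true <;> simp [hb])]
  simpa using foldl_append_map (fun line => (scanIndent line 0).getD (-1)) _ []
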